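-- pv_equiv track=rewrite | github.com/dgoswamiOmni/GeneticAlgorithm | GeneticAlgorithm.py | repair_offspring
-- ===== SOURCE A (Python) =====
-- def repair_offspring(offspring, candidate):
--     seen = set()
--     repaired_offspring = []
--
--     for chromosome in offspring:
--         if chromosome not in seen:
--             seen.add(chromosome)
--             repaired_offspring.append(chromosome)
--         else:
--             for replacement in candidate:
--                 if replacement not in seen:
--                     seen.add(replacement)
--                     repaired_offspring.append(replacement)
--                     break
--     return repaired_offspring
-- ===== SOURCE B (Python) =====
-- def repair_offspring(offspring, candidate):
--     # Single pass with a persistent advancing index into candidate: since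
--     # `seen` only grows, the first unseen candidate can only move forward,
--     # so we never rescan the candidate list from the start (O(n+m)).
--     seen = set()
--     repaired = []
--     j = 0
--     m = len(candidate)
--     for chromosome in offspring:
--         if chromosome not in seen:
--             seen.add(chromosome)
--             repaired.append(chromosome)
--         else:
--             while j < m and candidate[j] in seen:
--                 j += 1
--             if j < m:
--                 seen.add(candidate[j])
--                 repaired.append(candidate[j])
--                 j += 1
--     return repaired
-- ===== Notes on version B (the rewrite author's own statement) =====
-- stated objective: faster
-- what changed: A rescans the candidate list from the start for every duplicate; B keeps one persistent index into candidate that only advances (valid because the seen-set only grows) and runs as a single fold, turning the O(n*m) nested rescan into an O(n+m) pass.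
import Mathlib
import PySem

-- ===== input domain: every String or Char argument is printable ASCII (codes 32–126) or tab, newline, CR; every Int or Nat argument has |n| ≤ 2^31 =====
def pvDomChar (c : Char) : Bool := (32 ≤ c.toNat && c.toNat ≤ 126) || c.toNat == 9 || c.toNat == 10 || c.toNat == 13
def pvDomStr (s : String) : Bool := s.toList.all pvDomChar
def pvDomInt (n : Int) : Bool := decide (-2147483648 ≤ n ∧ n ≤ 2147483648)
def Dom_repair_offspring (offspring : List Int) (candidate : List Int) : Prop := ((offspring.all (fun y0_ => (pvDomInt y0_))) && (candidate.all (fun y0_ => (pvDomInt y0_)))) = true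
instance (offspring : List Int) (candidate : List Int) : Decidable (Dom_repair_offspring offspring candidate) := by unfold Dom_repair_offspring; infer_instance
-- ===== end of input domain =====

-- B replaces A's restart-from-the-start inner scan over `candidate` with one
-- persistent advancing index into it (sound because `seen` only grows): O(n*m) → O(n+m).

-- ===== PORT A =====
-- inner 'for replacement in candidate: … break': first element of candidate not in seen
def findRepl (seen : PySem.Set Int) : List Int → Option Int
  | [] => none
  | c :: cs => if PySem.Set.contains seen c then findRepl seen cs else some c

-- outer loop over offspring, state (seen, repaired_offspring)
def goA (cand : List Int) : List Int → PySem.Set Int → List Int → List Int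
  | [], _, acc => acc
  | x :: xs, seen, acc =>
    if PySem.Set.contains seen x then
      match findRepl seen cand with
      | some r => goA cand xs (PySem.Set.add seen r) (acc ++ [r])
      | none   => goA cand xs seen acc
    else
      goA cand xs (PySem.Set.add seen x) (acc ++ [x])

def repair_offspring (offspring : List Int) (candidate : List Int) : List Int :=
  goA candidate offspring PySem.Set.empty []

-- ===== PORT B =====
-- 'while j < m and candidate[j] in seen: j += 1' — advance the index past seen candidates
def skipSeen (cand : List Int) (seen : PySem.Set Int) (j : Nat) : Nat :=
  if h : j < cand.length then
    if PySem.Set.contains seen cand[j] then skipSeen cand seen (j + 1) else j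
  else j
termination_by cand.length - j

-- one iteration of B's for-loop body over state (seen, reversed output, index j)
def stepB (cand : List Int) (st : PySem.Set Int × List Int × Nat) (x : Int) :
    PySem.Set Int × List Int × Nat :=
  let (seen, rev, j) := st
  if PySem.Set.contains seen x then
    let j' := skipSeen cand seen j
    if h : j' < cand.length then
      (PySem.Set.add seen cand[j'], cand[j'] :: rev, j' + 1)
    else
      (seen, rev, j')
  else
    (PySem.Set.add seen x, x :: rev, j)

def repair_offspring_alt (offspring : List Int) (candidate : List Int) : List Int :=
  ((offspring.foldl (stepB candidate) (PySem.Set.empty, [], 0)).2.1).reverse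

-- ===== PRECONDITION & SPEC =====
def Spec_repair_offspring (offspring : List Int) (candidate : List Int) (out : List Int) : Prop := out = repair_offspring_alt offspring candidate
instance (offspring : List Int) (candidate : List Int) (out : List Int) : Decidable (Spec_repair_offspring offspring candidate out) := by unfold Spec_repair_offspring; infer_instance

-- ===== CLAIM (what is proved, stated in full; the proofs are below) =====
def Claim_equal_repair_offspring : Prop := ∀ (offspring : List Int) (candidate : List Int), Dom_repair_offspring offspring candidate → Spec_repair_offspring offspring candidate (repair_offspring offspring candidate)

-- ===== LEMMAS AND PROOFS =====

theorem contains_add_mono (seen : PySem.Set Int) (x c : Int)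
    (h : PySem.Set.contains seen c = true) :
    PySem.Set.contains (PySem.Set.add seen x) c = true := by
  simp [PySem.Set.add]
  split <;> simp_all

theorem contains_add_self (seen : PySem.Set Int) (x : Int) :
    PySem.Set.contains (PySem.Set.add seen x) x = true := by
  simp [PySem.Set.add]
  split <;> simp_all

-- findRepl ignores a prefix that is entirely in `seen`
theorem findRepl_append (seen : PySem.Set Int) (pre pool : List Int)
    (h : ∀ c ∈ pre, PySem.Set.contains seen c = true) :
    findRepl seen (pre ++ pool) = findRepl seen pool := by
  induction pre with
  | nil => rfl
  | cons c cs ih =>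
    simp only [List.cons_append, findRepl, h c (by simp)]
    exact ih (fun d hd => h d (by simp [hd]))

-- characterisation of skipSeen against findRepl on the remaining pool
theorem skipSeen_spec (cand : List Int) (seen : PySem.Set Int) :
    ∀ j, (∀ c ∈ cand.take j, PySem.Set.contains seen c = true) →
      (∀ c ∈ cand.take (skipSeen cand seen j), PySem.Set.contains seen c = true) ∧
      findRepl seen (cand.drop j) =
        (if h : skipSeen cand seen j < cand.length then some cand[skipSeen cand seen j] else none) := by
  intro j
  induction j using skipSeen.induct cand seen with
  | case1 j h hc ih =>
    intro hpre
    have hdrop : cand.drop j = cand[j] :: cand.drop (j + 1) := List.drop_eq_getElem_cons h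
    have hpre' : ∀ c ∈ cand.take (j + 1), PySem.Set.contains seen c = true := by
      intro c hcmem
      rw [List.take_add_one] at hcmem
      simp only [List.mem_append] at hcmem
      rcases hcmem with hcm | hcm
      · exact hpre c hcm
      · simp [List.getElem?_eq_getElem h] at hcm
        subst hcm; exact hc
    rcases ih hpre' with ⟨h3, h4⟩
    have hs : skipSeen cand seen j = skipSeen cand seen (j + 1) := by
      rw [skipSeen, dif_pos h, if_pos hc]
    simp only [hs]
    refine ⟨h3, ?_⟩
    rw [hdrop]
    simp only [findRepl, if_pos hc]
    exact h4
  | case2 j h hc =>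
    intro hpre
    have hdrop : cand.drop j = cand[j] :: cand.drop (j + 1) := List.drop_eq_getElem_cons h
    have hs : skipSeen cand seen j = j := by
      rw [skipSeen, dif_pos h, if_neg hc]
    simp only [hs]
    refine ⟨hpre, ?_⟩
    rw [hdrop]
    simp only [findRepl, if_neg hc, dif_pos h]
  | case3 j h =>
    intro hpre
    have hs : skipSeen cand seen j = j := by rw [skipSeen, dif_neg h]
    have hj : cand.length ≤ j := by omega
    simp only [hs]
    refine ⟨hpre, ?_⟩
    simp [List.drop_eq_nil_of_le hj, findRepl, Nat.not_lt.mpr hj]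

-- main invariant: A's recursion equals B's fold, given that everything before
-- index j in the candidate list has already been seen
theorem goA_eq_foldB (cand : List Int) :
    ∀ (off : List Int) (seen : PySem.Set Int) (rev : List Int) (j : Nat),
      (∀ c ∈ cand.take j, PySem.Set.contains seen c = true) →
      goA cand off seen rev.reverse =
        ((off.foldl (stepB cand) (seen, rev, j)).2.1).reverse := by
  intro off
  induction off with
  | nil => intro seen rev j _; rfl
  | cons x xs ih =>
    intro seen rev j hpre
    rcases skipSeen_spec cand seen j hpre with ⟨hpre', hfind⟩
    simp only [goA, List.foldl_cons, stepB]
    by_cases hx : PySem.Set.contains seen x = true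
    · simp only [hx, if_true]
      have hfind' : findRepl seen cand = findRepl seen (cand.drop j) := by
        conv_lhs => rw [← List.take_append_drop j cand]
        exact findRepl_append seen _ _ hpre
      by_cases hj : skipSeen cand seen j < cand.length
      · have : findRepl seen cand = some cand[skipSeen cand seen j] := by
          rw [hfind', hfind]; simp [hj]
        rw [this]
        simp only [hj, dif_pos]
        have hrev : rev.reverse ++ [cand[skipSeen cand seen j]] =
            (cand[skipSeen cand seen j] :: rev).reverse := by simp
        rw [hrev]
        apply ih
        intro c hcmem
        rw [List.take_add_one] at hcmem
        simp only [List.mem_append] at hcmem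
        rcases hcmem with hcm | hcm
        · exact contains_add_mono _ _ _ (hpre' c hcm)
        · simp [List.getElem?_eq_getElem hj] at hcm
          subst hcm; exact contains_add_self _ _
      · have : findRepl seen cand = none := by rw [hfind', hfind]; simp [hj]
        rw [this]
        simp only [hj, dif_neg, not_false_iff]
        exact ih seen rev _ hpre'
    · simp only [hx, if_false, Bool.false_eq_true]
      have hrev : rev.reverse ++ [x] = (x :: rev).reverse := by simp
      rw [hrev]
      apply ih
      intro c hcmem
      exact contains_add_mono _ _ _ (hpre c hcmem)

-- ===== VERDICT (by name: the statement is the Claim_ definition above) =====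
theorem repair_offspring_spec : Claim_equal_repair_offspring := by
  intro offspring candidate _
  unfold Spec_repair_offspring repair_offspring repair_offspring_alt
  have := goA_eq_foldB candidate offspring PySem.Set.empty [] 0 (by simp)
  simpa using this
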